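-- pv_equiv track=rewrite | github.com/textflint/textflint | textflint/input/component/sample/coref_sample.py | doc2sens
-- ===== SOURCE A (Python) =====
-- def doc2sens(x, sen_map):
--     """
--     Given x and sen_map, return sens.
--     Inverse to `sens2doc`.
--
--     :param list x: list of str (word list)
--     :param list sen_map: list of int (sen len list)
--     :return list: sens as 2nd list of str (word list list)
--
--     """
--     curr_idx = 0
--     sens = []
--     for i in range(len(sen_map)):
--         sen_len = sen_map[i]
--         if sen_len == 0: continue
--         sen = x[curr_idx: curr_idx+sen_len]
--         sens.append(sen)
--         curr_idx += sen_len
--     return sens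
-- ===== SOURCE B (Python) =====
-- def doc2sens(x, sen_map):
--     # Two-pass: build cumulative end offsets, derive starts, then slice.
--     ends = []
--     t = 0
--     for n in sen_map:
--         t += n
--         ends.append(t)
--     starts = [0] + ends[:-1]
--     return [x[s:e] for s, (e, n) in zip(starts, zip(ends, sen_map)) if n != 0]
-- ===== Notes on version B (the rewrite author's own statement) =====
-- stated objective: alternative
-- what changed: Replaces the single loop threading a running curr_idx through conditional appends by a two-pass decomposition: first a prefix-sum table of sentence end offsets, then one comprehension slicing x between consecutive offsets, filtering zero lengths.
import Mathlib
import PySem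

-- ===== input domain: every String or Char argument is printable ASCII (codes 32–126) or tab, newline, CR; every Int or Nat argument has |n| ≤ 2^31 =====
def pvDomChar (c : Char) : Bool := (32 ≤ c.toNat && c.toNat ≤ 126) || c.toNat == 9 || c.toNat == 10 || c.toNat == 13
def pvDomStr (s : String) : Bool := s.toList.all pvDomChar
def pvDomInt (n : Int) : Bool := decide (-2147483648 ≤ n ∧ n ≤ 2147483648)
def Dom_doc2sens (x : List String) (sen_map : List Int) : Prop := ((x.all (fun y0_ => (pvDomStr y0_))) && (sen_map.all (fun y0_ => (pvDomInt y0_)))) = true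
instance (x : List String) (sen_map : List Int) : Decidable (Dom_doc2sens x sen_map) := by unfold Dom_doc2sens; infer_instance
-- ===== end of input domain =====

-- B replaces A's single running-index loop by a two-pass decomposition (prefix-sum
-- offset table, then a slicing comprehension); same cost, equivalent on all inputs.

-- ===== PORT A =====
def doc2sens (x : List String) (sen_map : List Int) : List (List String) :=
  (((PySem.List.pyRange 0 (PySem.List.len sen_map) 1).foldl
    (fun (st : Int × List (List String)) i =>
      let sen_len := PySem.List.pyGetD sen_map i 0
      if sen_len == 0 then st
      else (st.1 + sen_len,
            st.2 ++ [PySem.List.slice x (some st.1) (some (st.1 + sen_len))]))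
    (0, []))).2

-- ===== PORT B =====
def doc2sens_alt (x : List String) (sen_map : List Int) : List (List String) :=
  let ends := (sen_map.foldl
    (fun (st : Int × List Int) n => (st.1 + n, st.2 ++ [st.1 + n])) (0, [])).2
  let starts := 0 :: ends.dropLast
  (starts.zip (ends.zip sen_map)).filterMap
    (fun p => if p.2.2 ≠ 0 then some (PySem.List.slice x (some p.1) (some p.2.1)) else none)

-- ===== PRECONDITION & SPEC =====
def Spec_doc2sens (x : List String) (sen_map : List Int) (out : List (List String)) : Prop := out = doc2sens_alt x sen_map
instance (x : List String) (sen_map : List Int) (out : List (List String)) : Decidable (Spec_doc2sens x sen_map out) := by unfold Spec_doc2sens; infer_instance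

-- ===== CLAIM (what is proved, stated in full; the proofs are below) =====
def Claim_equal_doc2sens : Prop := ∀ (x : List String) (sen_map : List Int), Dom_doc2sens x sen_map → Spec_doc2sens x sen_map (doc2sens x sen_map)

-- ===== LEMMAS AND PROOFS =====

-- reference form: slice at running prefix offset c, skipping zero lengths
def pvChop (x : List String) (c : Int) : List Int → List (List String)
  | [] => []
  | n :: ns =>
    if n = 0 then pvChop x c ns
    else PySem.List.slice x (some c) (some (c + n)) :: pvChop x (c + n) ns

-- end offsets starting from running total c
def pvEnds (c : Int) : List Int → List Int
  | [] => []
  | n :: ns => (c + n) :: pvEnds (c + n) ns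

theorem pvA_fold (x : List String) (ns : List Int) (c : Int) (acc : List (List String)) :
    ns.foldl
      (fun (st : Int × List (List String)) n =>
        if n == 0 then st
        else (st.1 + n, st.2 ++ [PySem.List.slice x (some st.1) (some (st.1 + n))]))
      (c, acc) = (c + ns.sum, acc ++ pvChop x c ns) := by
  induction ns generalizing c acc with
  | nil => simp [pvChop]
  | cons n ns ih =>
    rw [List.foldl_cons]
    by_cases h : n = 0
    · rw [if_pos (by simp [h]), ih]; simp [pvChop, h]
    · rw [if_neg (by simp [h]), ih]; simp [pvChop, h, add_assoc]

theorem pvB_fold (ns : List Int) (c : Int) (acc : List Int) :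
    ns.foldl (fun (st : Int × List Int) n => (st.1 + n, st.2 ++ [st.1 + n])) (c, acc)
      = (c + ns.sum, acc ++ pvEnds c ns) := by
  induction ns generalizing c acc with
  | nil => simp [pvEnds]
  | cons n ns ih => simp [pvEnds, ih, add_assoc]

theorem pvB_zip (x : List String) (ns : List Int) (c : Int) :
    ((c :: (pvEnds c ns).dropLast).zip ((pvEnds c ns).zip ns)).filterMap
      (fun p => if p.2.2 ≠ 0 then some (PySem.List.slice x (some p.1) (some p.2.1)) else none)
      = pvChop x c ns := by
  induction ns generalizing c with
  | nil => simp [pvEnds, pvChop]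
  | cons n ns ih =>
    cases ns with
    | nil =>
      by_cases h : n = 0 <;> simp [pvEnds, pvChop, h]
    | cons m ms =>
      have hne : pvEnds (c + n) (m :: ms) ≠ [] := by simp [pvEnds]
      simp only [pvEnds, List.zip_cons_cons,
        List.filterMap_cons]
      by_cases h : n = 0
      · simpa [pvChop, h, pvEnds] using ih (c + n)
      · simpa [pvChop, h, pvEnds] using ih (c + n)

-- ===== VERDICT (by name: the statement is the Claim_ definition above) =====
theorem doc2sens_spec : Claim_equal_doc2sens := by
  intro x sen_map _
  unfold Spec_doc2sens doc2sens doc2sens_alt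
  rw [show ((0 : Int), ([] : List (List String))) = ((0 : Int), ([] : List (List String))) from rfl]
  rw [PySem.List.foldl_pyRange_pyGetD (a := 0) (xs := sen_map) (d := 0)
    (f := fun (st : Int × List (List String)) n =>
      if n == 0 then st
      else (st.1 + n, st.2 ++ [PySem.List.slice x (some st.1) (some (st.1 + n))]))
    (init := ((0 : Int), ([] : List (List String)))) le_rfl]
  simp only [Int.toNat_zero, List.drop_zero, pvA_fold, pvB_fold, List.nil_append]
  exact (pvB_zip x sen_map 0).symm
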